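-- pv_equiv track=rewrite | github.com/Dhenz14/Hive-AI | hiveai/telemetry.py | best_confidence_band
-- ===== SOURCE A (Python) =====
-- _CONFIDENCE_RANK = {"high": 0, "good": 1, "mixed": 2, "low": 3}
--
-- def best_confidence_band(solved_example_details: list) -> str | None:
--     """Return the best (highest) confidence band from a list of solved example details."""
--     if not solved_example_details:
--         return None
--     best = None
--     best_rank = 999
--     for d in solved_example_details:
--         band = d.get("confidence", "low")
--         rank = _CONFIDENCE_RANK.get(band, 999)
--         if rank < best_rank:
--             best = band
--             best_rank = rank
--     return best
-- ===== SOURCE B (Python) =====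
-- def best_confidence_band(solved_example_details: list) -> str | None:
--     """Return the best (highest) confidence band from a list of solved example details."""
--     present = {d.get("confidence", "low") for d in solved_example_details}
--     for band in ("high", "good", "mixed", "low"):
--         if band in present:
--             return band
--     return None
-- ===== Notes on version B (the rewrite author's own statement) =====
-- stated objective: idiomatic
-- what changed: B builds a set of the bands present and probes the four known bands in fixed priority order, instead of A's running-minimum scan over a rank table; None falls out for empty lists and all-unknown bands.
import Mathlib
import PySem

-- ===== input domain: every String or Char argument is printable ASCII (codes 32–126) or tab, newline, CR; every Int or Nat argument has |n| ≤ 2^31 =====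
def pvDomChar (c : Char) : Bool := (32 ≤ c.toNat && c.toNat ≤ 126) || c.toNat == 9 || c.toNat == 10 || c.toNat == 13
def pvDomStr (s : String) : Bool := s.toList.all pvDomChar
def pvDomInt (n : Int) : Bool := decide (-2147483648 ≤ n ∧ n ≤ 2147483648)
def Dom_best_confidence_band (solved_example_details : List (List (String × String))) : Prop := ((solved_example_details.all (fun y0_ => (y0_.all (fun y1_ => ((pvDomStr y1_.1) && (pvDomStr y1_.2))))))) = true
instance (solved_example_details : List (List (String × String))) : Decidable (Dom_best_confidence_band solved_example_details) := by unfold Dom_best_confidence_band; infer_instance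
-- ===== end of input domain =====

-- B replaces A's running-minimum rank scan by a membership set probed in fixed priority order (idiomatic; same cost).


-- ===== PORT A =====
-- module constant _CONFIDENCE_RANK
def pvConfidenceRank : PySem.Dict String Int := PySem.Dict.mk [("high", 0), ("good", 1), ("mixed", 2), ("low", 3)]

def best_confidence_band (solved_example_details : List (List (String × String))) : Option String :=
  if solved_example_details = [] then none
  else
    (solved_example_details.foldl
      (fun (st : Option String × Int) (d : List (String × String)) =>
        let band := PySem.Dict.getD (PySem.Dict.mk d) "confidence" "low"
        let rank := PySem.Dict.getD pvConfidenceRank band 999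
        if rank < st.2 then (some band, rank) else st)
      (none, 999)).1

-- ===== PORT B =====
-- 'for band in ("high","good","mixed","low"): if band in present: return band' / 'return None'
def pvProbe (present : PySem.Set String) : List String → Option String
  | [] => none
  | b :: rest => if PySem.Set.contains present b then some b else pvProbe present rest

def best_confidence_band_alt (solved_example_details : List (List (String × String))) : Option String :=
  let present : PySem.Set String :=
    PySem.Set.ofList (solved_example_details.map
      (fun d => PySem.Dict.getD (PySem.Dict.mk d) "confidence" "low"))
  pvProbe present ["high", "good", "mixed", "low"]

-- ===== PRECONDITION & SPEC =====
def Spec_best_confidence_band (solved_example_details : List (List (String × String))) (out : Option String) : Prop := out = best_confidence_band_alt solved_example_details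
instance (solved_example_details : List (List (String × String))) (out : Option String) : Decidable (Spec_best_confidence_band solved_example_details out) := by unfold Spec_best_confidence_band; infer_instance

-- ===== CLAIM (what is proved, stated in full; the proofs are below) =====
def Claim_equal_best_confidence_band : Prop := ∀ (solved_example_details : List (List (String × String))), Dom_best_confidence_band solved_example_details → Spec_best_confidence_band solved_example_details (best_confidence_band solved_example_details)

-- ===== LEMMAS AND PROOFS =====

-- the band recorded in a detail dict
def pvBand (d : List (String × String)) : String := PySem.Dict.getD (PySem.Dict.mk d) "confidence" "low"

-- rank of a band
def pvRank (s : String) : Int := PySem.Dict.getD pvConfidenceRank s 999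

-- the band a final minimal rank denotes
def pvBandOf (r : Int) : Option String :=
  if r = 0 then some "high" else if r = 1 then some "good"
  else if r = 2 then some "mixed" else if r = 3 then some "low" else none

-- A's fold step, on the band string
def pvG (st : Option String × Int) (band : String) : Option String × Int :=
  if pvRank band < st.2 then (some band, pvRank band) else st

-- the running-minimum accumulator of A's loop
def pvMin (m : Int) (s : String) : Int := min m (pvRank s)

-- minimal rank of a list of bands
def pvMr (bands : List String) : Int := bands.foldl pvMin 999

-- B's result as a priority chain over plain membership
def pvPick (bands : List String) : Option String :=
  if "high" ∈ bands then some "high" else if "good" ∈ bands then some "good"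
  else if "mixed" ∈ bands then some "mixed" else if "low" ∈ bands then some "low" else none

theorem pvRank_eq (s : String) : pvRank s =
    if s = "high" then 0 else if s = "good" then 1 else if s = "mixed" then 2
    else if s = "low" then 3 else 999 := by
  unfold pvRank pvConfidenceRank
  rw [PySem.Dict.getD_eq_get?_getD]
  rw [PySem.Dict.get?_mk_cons, PySem.Dict.get?_mk_cons, PySem.Dict.get?_mk_cons, PySem.Dict.get?_mk_cons]
  split_ifs <;> simp_all [PySem.Dict.get?]

theorem pvRank_cases (s : String) :
    pvRank s = 0 ∨ pvRank s = 1 ∨ pvRank s = 2 ∨ pvRank s = 3 ∨ pvRank s = 999 := by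
  rw [pvRank_eq]; split_ifs <;> norm_num

theorem pvBandOf_rank (x : String) (hx : pvRank x ≠ 999) : pvBandOf (pvRank x) = some x := by
  rw [pvRank_eq] at *
  split_ifs at * <;> simp_all [pvBandOf]

theorem pvMrA_eq (t : List String) : ∀ r : Int, r ≤ 999 →
    t.foldl pvMin r = min r (t.foldl pvMin 999) := by
  induction t with
  | nil => intro r hr; simp; omega
  | cons x t ih =>
    intro r hr
    have hx := pvRank_cases x
    simp only [List.foldl_cons, pvMin]
    rw [ih (min r (pvRank x)) (by omega), ih (min 999 (pvRank x)) (by omega)]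
    omega

theorem pvMr_cons (x : String) (t : List String) :
    pvMr (x :: t) = min (pvRank x) (pvMr t) := by
  have hx := pvRank_cases x
  unfold pvMr
  simp only [List.foldl_cons, pvMin]
  rw [pvMrA_eq t (min 999 (pvRank x)) (by omega)]
  omega

theorem pvMr_mem (bands : List String) :
    pvMr bands = 0 ∨ pvMr bands = 1 ∨ pvMr bands = 2 ∨ pvMr bands = 3 ∨ pvMr bands = 999 := by
  induction bands with
  | nil => simp [pvMr]
  | cons x t ih =>
    rw [pvMr_cons]
    have hx := pvRank_cases x
    omega

theorem pvMr_le_iff (bands : List String) (k : Int) (hk : k < 999) :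
    pvMr bands ≤ k ↔ ∃ s ∈ bands, pvRank s ≤ k := by
  induction bands with
  | nil => simp [pvMr]; omega
  | cons x t ih =>
    rw [pvMr_cons]
    simp only [List.mem_cons]
    constructor
    · intro h
      rcases min_le_iff.mp h with h | h
      · exact ⟨x, Or.inl rfl, h⟩
      · obtain ⟨s, hs, hr⟩ := ih.mp h
        exact ⟨s, Or.inr hs, hr⟩
    · rintro ⟨s, hs | hs, hr⟩
      · subst hs; exact min_le_iff.mpr (Or.inl hr)
      · exact min_le_iff.mpr (Or.inr (ih.mpr ⟨s, hs, hr⟩))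

theorem pvRank_le_zero (s : String) : pvRank s ≤ 0 ↔ s = "high" := by
  rw [pvRank_eq]; split_ifs <;> simp_all

theorem pvRank_le_one (s : String) : pvRank s ≤ 1 ↔ s = "high" ∨ s = "good" := by
  rw [pvRank_eq]; split_ifs <;> simp_all

theorem pvRank_le_two (s : String) : pvRank s ≤ 2 ↔ s = "high" ∨ s = "good" ∨ s = "mixed" := by
  rw [pvRank_eq]; split_ifs <;> simp_all

theorem pvRank_le_three (s : String) : pvRank s ≤ 3 ↔ s = "high" ∨ s = "good" ∨ s = "mixed" ∨ s = "low" := by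
  rw [pvRank_eq]; split_ifs <;> simp_all

-- minimal ranks correspond to priority membership
theorem pvPick_eq_bandOf_mr (bands : List String) : pvPick bands = pvBandOf (pvMr bands) := by
  have hmem := pvMr_mem bands
  have h0 := pvMr_le_iff bands 0 (by norm_num)
  have h1 := pvMr_le_iff bands 1 (by norm_num)
  have h2 := pvMr_le_iff bands 2 (by norm_num)
  have h3 := pvMr_le_iff bands 3 (by norm_num)
  simp only [pvRank_le_zero] at h0
  simp only [pvRank_le_one] at h1
  simp only [pvRank_le_two] at h2
  simp only [pvRank_le_three] at h3
  unfold pvPick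
  split_ifs with g0 g1 g2 g3
  · have hv : pvMr bands = 0 := by
      have := h0.mpr ⟨_, g0, rfl⟩; omega
    rw [hv]; rfl
  · have hle : pvMr bands ≤ 1 := h1.mpr ⟨_, g1, Or.inr rfl⟩
    have hn0 : ¬ pvMr bands ≤ 0 := fun h => by
      obtain ⟨s, hs, rfl⟩ := h0.mp h; exact g0 hs
    have hv : pvMr bands = 1 := by omega
    rw [hv]; rfl
  · have hle : pvMr bands ≤ 2 := h2.mpr ⟨_, g2, Or.inr (Or.inr rfl)⟩
    have hn1 : ¬ pvMr bands ≤ 1 := fun h => by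
      obtain ⟨s, hs, hv⟩ := h1.mp h
      rcases hv with rfl | rfl
      · exact g0 hs
      · exact g1 hs
    have hv : pvMr bands = 2 := by omega
    rw [hv]; rfl
  · have hle : pvMr bands ≤ 3 := h3.mpr ⟨_, g3, Or.inr (Or.inr (Or.inr rfl))⟩
    have hn2 : ¬ pvMr bands ≤ 2 := fun h => by
      obtain ⟨s, hs, hv⟩ := h2.mp h
      rcases hv with rfl | rfl | rfl
      · exact g0 hs
      · exact g1 hs
      · exact g2 hs
    have hv : pvMr bands = 3 := by omega
    rw [hv]; rfl
  · have hn3 : ¬ pvMr bands ≤ 3 := fun h => by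
      obtain ⟨s, hs, hv⟩ := h3.mp h
      rcases hv with rfl | rfl | rfl | rfl
      · exact g0 hs
      · exact g1 hs
      · exact g2 hs
      · exact g3 hs
    have hv : pvMr bands = 999 := by omega
    rw [hv]; rfl

-- A's fold, started at a coherent state, lands on pvBandOf of the running minimum
theorem pvFoldA (bands : List String) : ∀ r : Int,
    (r = 0 ∨ r = 1 ∨ r = 2 ∨ r = 3 ∨ r = 999) →
    bands.foldl pvG (pvBandOf r, r) =
      (pvBandOf (bands.foldl pvMin r), bands.foldl pvMin r) := by
  induction bands with
  | nil => intro r _; simp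
  | cons x t ih =>
    intro r hr
    have hx := pvRank_cases x
    simp only [List.foldl_cons]
    have hstep : pvG (pvBandOf r, r) x = (pvBandOf (pvMin r x), pvMin r x) := by
      unfold pvG pvMin
      by_cases h : pvRank x < r
      · have hmin : min r (pvRank x) = pvRank x := by omega
        have hne : pvRank x ≠ 999 := by omega
        rw [hmin, if_pos h, pvBandOf_rank x hne]
      · have hmin : min r (pvRank x) = r := by omega
        rw [hmin, if_neg h]
    rw [hstep]
    exact ih (pvMin r x) (by unfold pvMin; omega)

theorem pvA_char (xs : List (List (String × String))) :
    best_confidence_band xs = pvBandOf (pvMr (xs.map pvBand)) := by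
  unfold best_confidence_band
  by_cases h : xs = []
  · simp [h, pvMr, pvBandOf]
  · rw [if_neg h]
    have hfold : xs.foldl
        (fun (st : Option String × Int) (d : List (String × String)) =>
          let band := PySem.Dict.getD (PySem.Dict.mk d) "confidence" "low"
          let rank := PySem.Dict.getD pvConfidenceRank band 999
          if rank < st.2 then (some band, rank) else st)
        (none, 999)
        = (xs.map pvBand).foldl pvG (none, 999) := by
      rw [List.foldl_map]
      rfl
    rw [hfold]
    rw [show ((none : Option String), (999 : Int)) = (pvBandOf 999, (999 : Int)) from rfl]
    rw [pvFoldA (xs.map pvBand) 999 (by omega)]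
    rfl

theorem pvSet_contains_ofList (l : List String) (b : String) :
    (PySem.Set.contains (PySem.Set.ofList l) b = true) ↔ b ∈ l := by
  simp [PySem.Set.contains, PySem.Set.mem_ofList]

theorem pvB_char (xs : List (List (String × String))) :
    best_confidence_band_alt xs = pvPick (xs.map pvBand) := by
  unfold best_confidence_band_alt pvPick pvBand
  simp only [pvProbe]
  simp only [pvSet_contains_ofList]

-- ===== VERDICT (by name: the statement is the Claim_ definition above) =====
theorem best_confidence_band_spec : Claim_equal_best_confidence_band := by
  intro xs _
  unfold Spec_best_confidence_band
  rw [pvA_char, pvB_char, pvPick_eq_bandOf_mr]
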